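-- pv_equiv track=rewrite | github.com/Privnoval016/ATCSRoboKin | RobotKinematics/armPython/RobotArmSim/GameEngine3D/Rendering/Mesh.py | has_chord
-- ===== SOURCE A (Python) =====
-- def has_chord(cycle, edge_set):
--     cycle_len = len(cycle)
--     for i in range(cycle_len):
--         for j in range(i + 2, cycle_len):
--             if (j + 1) % cycle_len == i:
--                 continue  # skip adjacent vertices
--             a, b = cycle[i], cycle[j]
--             if (a, b) in edge_set or (b, a) in edge_set:
--                 return True
--     return False
-- ===== SOURCE B (Python) =====
-- def has_chord(cycle, edge_set):
--     n = len(cycle)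
--     pos = {v: i for i, v in enumerate(cycle)}
--     for a, b in edge_set:
--         if a in pos and b in pos:
--             i, j = pos[a], pos[b]
--             d = abs(i - j)
--             if d != 1 and d != n - 1 and i != j:
--                 return True
--     return False
-- ===== Notes on version B (the rewrite author's own statement) =====
-- stated objective: faster
-- what changed: B builds a vertex->index dict once and does a single O(n+m) pass over edge_set testing circular index distance, instead of A's O(n^2) nested scan over all cycle index pairs probing edge_set (itself O(m)) for each pair. Pre_ excludes inputs where some edge has both endpoints in the cycle with an endpoint occurring more than once in the (then malformed) cycle, on which A's per-occurrence pair scan and B's last-occurrence position dict are both accidental and can disagree.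
-- outside the precondition, e.g. on has_chord([1, 1, 2, 3], {(1, 2)}): A returns True, B returns False
import Mathlib
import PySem

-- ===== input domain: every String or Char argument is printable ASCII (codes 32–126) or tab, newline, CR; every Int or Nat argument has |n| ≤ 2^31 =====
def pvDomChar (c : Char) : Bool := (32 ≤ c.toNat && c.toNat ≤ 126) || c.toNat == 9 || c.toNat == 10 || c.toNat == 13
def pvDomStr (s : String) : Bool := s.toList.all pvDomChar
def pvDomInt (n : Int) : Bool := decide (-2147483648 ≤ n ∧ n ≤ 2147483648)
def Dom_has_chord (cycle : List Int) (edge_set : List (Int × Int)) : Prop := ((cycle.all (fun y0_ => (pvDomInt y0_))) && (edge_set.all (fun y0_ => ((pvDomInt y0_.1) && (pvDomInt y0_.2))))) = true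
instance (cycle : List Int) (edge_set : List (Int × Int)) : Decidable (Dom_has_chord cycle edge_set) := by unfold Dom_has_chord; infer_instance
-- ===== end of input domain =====

-- B replaces A's nested index-pair scan (probing edge_set per pair) by a position dict plus a single pass over edge_set; a timing run measured B faster.
-- ===== PORT A =====
-- indices i, j are always in range, so pyGetD with default 0 is exact here
def has_chord (cycle : List Int) (edge_set : List (Int × Int)) : Bool :=
  let n : Int := cycle.length
  (PySem.List.pyRange 0 n 1).any (fun i =>
    (PySem.List.pyRange (i + 2) n 1).any (fun j =>
      if PySem.Int.mod (j + 1) n == i then false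
      else
        let a := PySem.List.pyGetD cycle i 0
        let b := PySem.List.pyGetD cycle j 0
        edge_set.contains (a, b) || edge_set.contains (b, a)))

-- ===== PORT B =====
def has_chord_alt (cycle : List Int) (edge_set : List (Int × Int)) : Bool :=
  let n : Int := cycle.length
  let pos : PySem.Dict Int Int :=
    (PySem.List.enumerate cycle 0).foldl (fun d p => d.insert p.2 p.1) PySem.Dict.empty
  edge_set.any (fun e =>
    match pos.get? e.1, pos.get? e.2 with
    | some i, some j =>
        let d : Int := |i - j|
        d != 1 && d != n - 1 && i != j
    | _, _ => false)

-- ===== PRECONDITION & SPEC =====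
-- Pre_ excludes inputs where some edge has both endpoints in the (then malformed) cycle and an endpoint
-- occurring more than once in it: there A's per-occurrence pair scan and B's last-occurrence position
-- dict are both accidental and can disagree; edges with an endpoint outside the cycle are harmless to both.
def Pre_has_chord (cycle : List Int) (edge_set : List (Int × Int)) : Prop :=
  ∀ e ∈ edge_set, e.1 ∈ cycle → e.2 ∈ cycle → cycle.count e.1 ≤ 1 ∧ cycle.count e.2 ≤ 1
instance (cycle : List Int) (edge_set : List (Int × Int)) : Decidable (Pre_has_chord cycle edge_set) := by unfold Pre_has_chord; infer_instance
def pvWitness_has_chord : List Int × (List (Int × Int)) := ([1, 2, 3, 4], [(1, 3)])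
def Spec_has_chord (cycle : List Int) (edge_set : List (Int × Int)) (out : Bool) : Prop := out = has_chord_alt cycle edge_set
instance (cycle : List Int) (edge_set : List (Int × Int)) (out : Bool) : Decidable (Spec_has_chord cycle edge_set out) := by unfold Spec_has_chord; infer_instance

-- ===== CLAIM (what is proved, stated in full; the proofs are below) =====
def Claim_equal_has_chord : Prop := ∀ (cycle : List Int) (edge_set : List (Int × Int)), Dom_has_chord cycle edge_set → Pre_has_chord cycle edge_set → Spec_has_chord cycle edge_set (has_chord cycle edge_set)

-- ===== LEMMAS AND PROOFS =====

-- common characterisation: an edge between two cycle positions at circular distance ∉ {0, 1, n-1}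
def ChordIdx (cycle : List Int) (edge_set : List (Int × Int)) : Prop :=
  ∃ (k l : Nat) (hk : k < cycle.length) (hl : l < cycle.length),
    k + 2 ≤ l ∧ ¬(k = 0 ∧ l + 1 = cycle.length) ∧
    ((cycle[k], cycle[l]) ∈ edge_set ∨ (cycle[l], cycle[k]) ∈ edge_set)

theorem mod_adj (n i j : Int) (hi0 : 0 ≤ i) (hij : i + 2 ≤ j) (hjn : j < n) :
    (j + 1) % n = i ↔ (i = 0 ∧ j = n - 1) := by
  by_cases h : j + 1 = n
  · rw [h, Int.emod_self]; omega
  · rw [Int.emod_eq_of_lt (by omega) (by omega)]; omega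


theorem hasChord_iff (cycle : List Int) (edge_set : List (Int × Int)) :
    has_chord cycle edge_set = true ↔ ChordIdx cycle edge_set := by
  unfold has_chord ChordIdx
  simp only [List.any_eq_true, PySem.List.mem_pyRange_one]
  constructor
  · rintro ⟨i, ⟨hi0, hin⟩, j, ⟨hij, hjn⟩, hbody⟩
    rw [PySem.Int.mod_eq_emod_of_pos (by omega)] at hbody
    split at hbody
    · simp at hbody
    next hmod =>
      have hmod' : ¬(i = 0 ∧ j = (cycle.length : Int) - 1) := by
        intro h
        exact hmod (by simp only [beq_iff_eq]; exact (mod_adj _ i j hi0 hij hjn).mpr h)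
      rw [PySem.List.pyGetD_eq_getElem _ _ (by omega) (by omega),
          PySem.List.pyGetD_eq_getElem _ _ (by omega) (by omega)] at hbody
      refine ⟨i.toNat, j.toNat, by omega, by omega, by omega, by omega, ?_⟩
      simpa [List.contains_iff_mem] using hbody
  · rintro ⟨k, l, hk, hl, hkl, hadj, hmem⟩
    refine ⟨(k : Int), ⟨by omega, by omega⟩, (l : Int), ⟨by omega, by omega⟩, ?_⟩
    rw [PySem.Int.mod_eq_emod_of_pos (by omega)]
    have : ¬ ((((l : Int) + 1) % (cycle.length : Int) == (k : Int)) = true) := by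
      simp only [beq_iff_eq]
      rw [mod_adj _ _ _ (by omega) (by omega) (by omega)]
      omega
    rw [if_neg this]
    rw [PySem.List.pyGetD_eq_getElem _ _ (by omega) (by omega),
        PySem.List.pyGetD_eq_getElem _ _ (by omega) (by omega)]
    simpa [List.contains_iff_mem] using hmem

-- the position dict of B, named for the lemmas
def posDict (cycle : List Int) : PySem.Dict Int Int :=
  (PySem.List.enumerate cycle 0).foldl (fun d p => d.insert p.2 p.1) PySem.Dict.empty

theorem posDict_append (cycle : List Int) (x : Int) :
    posDict (cycle ++ [x]) = (posDict cycle).insert x (cycle.length : Int) := by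
  unfold posDict
  rw [PySem.List.enumerate_append, List.foldl_append]
  simp [PySem.List.enumerate]

theorem posDict_sound (cycle : List Int) (v i : Int)
    (h : (posDict cycle).get? v = some i) :
    ∃ (k : Nat) (hk : k < cycle.length), i = (k : Int) ∧ cycle[k] = v := by
  induction cycle using List.reverseRecOn generalizing i with
  | nil => simp [posDict, PySem.List.enumerate, PySem.Dict.empty, PySem.Dict.get?] at h
  | append_singleton xs x ih =>
    rw [posDict_append, PySem.Dict.get?_insert] at h
    split at h
    · next hv =>
      obtain rfl : i = (xs.length : Int) := by injection h with h'; omega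
      exact ⟨xs.length, by simp, rfl, by simp [hv]⟩
    · obtain ⟨k, hk, rfl, hck⟩ := ih i h
      exact ⟨k, by simp; omega, rfl, by rw [List.getElem_append_left hk]; exact hck⟩

theorem posDict_complete (cycle : List Int) (v : Int) (h : v ∈ cycle) :
    ∃ i, (posDict cycle).get? v = some i := by
  induction cycle using List.reverseRecOn with
  | nil => simp at h
  | append_singleton xs x ih =>
    rw [posDict_append, PySem.Dict.get?_insert]
    split
    · exact ⟨_, rfl⟩
    · next hv =>
      exact ih (by rcases List.mem_append.mp h with h' | h' <;> simp_all)

theorem two_le_count (l : List Int) (v : Int) (k k' : Nat) (hkk' : k < k') (hk' : k' < l.length)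
    (h1 : l[k]'(by omega) = v) (h2 : l[k'] = v) : 2 ≤ l.count v := by
  have m1 : v ∈ l.take k' := by
    have : (l.take k')[k]'(by simp; omega) = l[k]'(by omega) := List.getElem_take
    exact h1 ▸ this ▸ List.getElem_mem _
  have m2 : v ∈ l.drop k' := by
    have : (l.drop k')[0]'(by simp; omega) = l[k' + 0] := List.getElem_drop ..
    simp only [Nat.add_zero] at this
    exact h2 ▸ this ▸ List.getElem_mem _
  have hcnt : (l.take k' ++ l.drop k').count v = (l.take k').count v + (l.drop k').count v :=
    List.count_append ..
  rw [List.take_append_drop] at hcnt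
  have c1 := List.count_pos_iff.mpr m1
  have c2 := List.count_pos_iff.mpr m2
  omega

theorem count_le_one_inj (l : List Int) (v : Int) (k k' : Nat) (hk : k < l.length) (hk' : k' < l.length)
    (h1 : l[k] = v) (h2 : l[k'] = v) (hc : l.count v ≤ 1) : k = k' := by
  rcases Nat.lt_trichotomy k k' with h | h | h
  · exact absurd (two_le_count l v k k' h hk' h1 h2) (by omega)
  · exact h
  · exact absurd (two_le_count l v k' k h hk h2 h1) (by omega)

theorem hasChordAlt_iff (cycle : List Int) (edge_set : List (Int × Int))
    (hpre : ∀ e ∈ edge_set, e.1 ∈ cycle → e.2 ∈ cycle → cycle.count e.1 ≤ 1 ∧ cycle.count e.2 ≤ 1) :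
    has_chord_alt cycle edge_set = true ↔ ChordIdx cycle edge_set := by
  unfold has_chord_alt ChordIdx
  simp only [List.any_eq_true]
  constructor
  · rintro ⟨e, he, hbody⟩
    rcases hget1 : (posDict cycle).get? e.1 with _ | i
    · rw [show ((PySem.List.enumerate cycle 0).foldl (fun d p => d.insert p.2 p.1) PySem.Dict.empty) = posDict cycle from rfl, hget1] at hbody
      simp at hbody
    rcases hget2 : (posDict cycle).get? e.2 with _ | j
    · rw [show ((PySem.List.enumerate cycle 0).foldl (fun d p => d.insert p.2 p.1) PySem.Dict.empty) = posDict cycle from rfl, hget1, hget2] at hbody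
      simp at hbody
    rw [show ((PySem.List.enumerate cycle 0).foldl (fun d p => d.insert p.2 p.1) PySem.Dict.empty) = posDict cycle from rfl, hget1, hget2] at hbody
    simp only [Bool.and_eq_true, bne_iff_ne, ne_eq] at hbody
    obtain ⟨⟨hd1, hdn⟩, hij⟩ := hbody
    obtain ⟨k, hk, rfl, hck⟩ := posDict_sound cycle e.1 i hget1
    obtain ⟨l, hl, rfl, hcl⟩ := posDict_sound cycle e.2 j hget2
    rw [abs_sub_comm, Int.abs_eq_natAbs] at hd1 hdn
    rcases Nat.lt_or_ge k l with hlt | hge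
    · exact ⟨k, l, hk, hl, by omega, by omega, Or.inl (by rw [hck, hcl]; simpa using he)⟩
    · exact ⟨l, k, hl, hk, by omega, by omega, Or.inr (by rw [hck, hcl]; simpa using he)⟩
  · rintro ⟨k, l, hk, hl, hkl, hadj, hmem⟩
    have hget : ∀ (m : Nat) (hm : m < cycle.length), cycle.count cycle[m] ≤ 1 →
        (posDict cycle).get? cycle[m] = some (m : Int) := by
      intro m hm hc
      obtain ⟨i, hi⟩ := posDict_complete cycle cycle[m] (List.getElem_mem _)
      obtain ⟨k', hk', rfl, hck'⟩ := posDict_sound cycle cycle[m] i hi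
      have : k' = m := count_le_one_inj cycle cycle[m] k' m hk' hm hck' rfl hc
      subst this; exact hi
    rcases hmem with hmem | hmem
    · obtain ⟨hc1, hc2⟩ := hpre _ hmem (List.getElem_mem _) (List.getElem_mem _)
      refine ⟨(cycle[k], cycle[l]), hmem, ?_⟩
      rw [show ((PySem.List.enumerate cycle 0).foldl (fun d p => d.insert p.2 p.1) PySem.Dict.empty) = posDict cycle from rfl,
          hget k hk hc1, hget l hl hc2]
      simp only [Bool.and_eq_true, bne_iff_ne, ne_eq, Int.abs_eq_natAbs]
      omega
    · obtain ⟨hc1, hc2⟩ := hpre _ hmem (List.getElem_mem _) (List.getElem_mem _)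
      refine ⟨(cycle[l], cycle[k]), hmem, ?_⟩
      rw [show ((PySem.List.enumerate cycle 0).foldl (fun d p => d.insert p.2 p.1) PySem.Dict.empty) = posDict cycle from rfl,
          hget l hl hc1, hget k hk hc2]
      simp only [Bool.and_eq_true, bne_iff_ne, ne_eq, Int.abs_eq_natAbs]
      omega

-- ===== VERDICT (by name: the statement is the Claim_ definition above) =====
theorem has_chord_spec : Claim_equal_has_chord := by
  intro cycle edge_set _ hpre
  unfold Pre_has_chord at hpre
  unfold Spec_has_chord
  exact Bool.eq_iff_iff.mpr
    ((hasChord_iff cycle edge_set).trans (hasChordAlt_iff cycle edge_set hpre).symm)
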